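-- pv_equiv track=rewrite | github.com/Nileshwar-Paul-au17/Python | M4/AloneArrray.py | check
-- ===== SOURCE A (Python) =====
-- def check(n,nums):
--     nums.sort()
--     dict={}
--     list=[]
--     for i in nums:
--         if (i in dict):
--             dict[i]+=1
--         else:
--             dict[i]=1
--
--     for key,value in dict.items():
--         if (value == 1):
--
--
--             if(key+1 not in dict):
--
--                 if(key-1 not in dict):
--                     list.append(key)
--     return list
-- ===== SOURCE B (Python) =====
-- def check(n, nums):
--     # One pass over the sorted data: group equal values into runs and test
--     # the neighbouring distinct values directly; no dict needed.
--     nums.sort()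
--     res = []
--     prev = None
--     i = 0
--     m = len(nums)
--     while i < m:
--         v = nums[i]
--         j = i + 1
--         while j < m and nums[j] == v:
--             j += 1
--         if j - i == 1 and prev != v - 1 and (j == m or nums[j] != v + 1):
--             res.append(v)
--         prev = v
--         i = j
--     return res
-- ===== Notes on version B (the rewrite author's own statement) =====
-- stated objective: simpler
-- what changed: Replaced the Counter dict plus key+-1 membership tests by a single left-to-right scan of the sorted list that groups equal values into runs and checks run length and the adjacent distinct neighbours; nums.sort() (in-place mutation) is kept.
import Mathlib
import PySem

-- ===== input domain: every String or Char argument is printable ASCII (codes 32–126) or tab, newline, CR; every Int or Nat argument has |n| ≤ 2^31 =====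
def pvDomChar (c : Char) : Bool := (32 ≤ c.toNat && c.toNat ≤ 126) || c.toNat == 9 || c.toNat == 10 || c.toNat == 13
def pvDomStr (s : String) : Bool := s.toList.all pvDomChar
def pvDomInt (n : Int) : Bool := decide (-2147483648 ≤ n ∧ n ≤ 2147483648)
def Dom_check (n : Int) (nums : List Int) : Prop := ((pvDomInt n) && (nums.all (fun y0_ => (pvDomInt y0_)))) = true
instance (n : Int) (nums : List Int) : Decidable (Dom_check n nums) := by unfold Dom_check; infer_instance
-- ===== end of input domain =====

-- B replaces A's Counter dict and key±1 membership tests by a single run-grouping scan of the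
-- sorted list; both sort nums (A mutates nums in place with nums.sort(), B keeps that mutation);
-- the equivalence proved here is about the return value.

-- ===== PORT A =====
def check (n : Int) (nums : List Int) : List Int :=
  let s := PySem.List.sorted nums (fun x => x) false
  let d := s.foldl
    (fun d i => if d.contains i then d.insert i (d.getD i 0 + 1) else d.insert i 1)
    (PySem.Dict.empty : PySem.Dict Int Int)
  d.items.foldl
    (fun acc kv =>
      if kv.2 == 1 then
        if !(d.contains (kv.1 + 1)) then
          if !(d.contains (kv.1 - 1)) then acc ++ [kv.1] else acc
        else acc
      else acc)
    []

-- ===== PORT B =====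
-- the outer while loop of Source B: prev = last distinct value already passed; the inner while
-- (advancing j over the run of v) is the takeWhile/dropWhile split of the remaining list.
def checkAltLoop (prev : Option Int) : List Int → List Int
  | [] => []
  | v :: rest =>
    let r := rest.dropWhile (fun x => x == v)
    let keep := ((rest.takeWhile (fun x => x == v)).length == 0)
        && (prev != some (v - 1))
        && (match r.head? with | none => true | some w => w != v + 1)
    (if keep then [v] else []) ++ checkAltLoop (some v) r
termination_by l => l.length
decreasing_by
  exact Nat.lt_succ_of_le (List.length_dropWhile_le _ _)

def check_alt (n : Int) (nums : List Int) : List Int :=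
  checkAltLoop none (PySem.List.sorted nums (fun x => x) false)

-- ===== PRECONDITION & SPEC =====
def Spec_check (n : Int) (nums : List Int) (out : List Int) : Prop := out = check_alt n nums
instance (n : Int) (nums : List Int) (out : List Int) : Decidable (Spec_check n nums out) := by unfold Spec_check; infer_instance

-- ===== CLAIM (what is proved, stated in full; the proofs are below) =====
def Claim_equal_check : Prop := ∀ (n : Int) (nums : List Int), Dom_check n nums → Spec_check n nums (check n nums)

-- ===== LEMMAS AND PROOFS =====

-- the common reference predicate: k occurs exactly once in s, k+1 is absent from s, and k-1 is
-- absent from both the already-consumed part (summarised by prev) and from s.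
def condB (prev : Option Int) (s : List Int) (k : Int) : Bool :=
  ((s.count k : Int) == 1) && !(s.contains (k + 1)) && (prev != some (k - 1)) && !(s.contains (k - 1))

lemma discard_ofList_all_eq (t r : List Int) (v : Int)
    (ht : ∀ x ∈ t, x = v) (hr : v ∉ r) :
    (PySem.Set.ofList (t ++ r)).discard v = PySem.Set.ofList r := by
  induction t with
  | nil =>
    simp only [List.nil_append, PySem.Set.discard]
    apply List.filter_eq_self.mpr
    intro x hx
    have hxr : x ∈ r := (PySem.Set.mem_ofList r x).mp hx
    simp only [Bool.not_eq_eq_eq_not, Bool.not_true, beq_eq_false_iff_ne, ne_eq]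
    exact fun h => hr (h ▸ hxr)
  | cons y t' ih =>
    have hy : y = v := ht y (by simp)
    subst hy
    rw [List.cons_append, PySem.Set.ofList_cons]
    show ((y :: (PySem.Set.ofList (t' ++ r)).discard y).filter (fun z => !z == y)) = _
    simp only [List.filter_cons, beq_self_eq_true, Bool.not_true, Bool.false_eq_true, if_false]
    have := ih (fun x hx => ht x (by simp [hx]))
    rw [show ((PySem.Set.ofList (t' ++ r)).discard y).filter (fun z => !z == y)
          = (PySem.Set.ofList (t' ++ r)).discard y from by
        simp [PySem.Set.discard, List.filter_filter]]
    rw [this]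

lemma ofList_run (t r : List Int) (v : Int)
    (ht : ∀ x ∈ t, x = v) (hr : v ∉ r) :
    PySem.Set.ofList (v :: (t ++ r)) = v :: PySem.Set.ofList r := by
  rw [PySem.Set.ofList_cons, discard_ofList_all_eq t r v ht hr]

lemma altLoop_eq (s : List Int) (prev : Option Int)
    (hs : s.Pairwise (· ≤ ·))
    (hp : ∀ p, prev = some p → ∀ x ∈ s, p < x) :
    checkAltLoop prev s = (PySem.Set.ofList s).filter (condB prev s) := by
  induction prev, s using checkAltLoop.induct with
  | case1 prev => simp [checkAltLoop, PySem.Set.ofList]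
  | case2 prev v rest r ih =>
    have hrdef : r = rest.dropWhile (fun x => x == v) := rfl
    have hunf : checkAltLoop prev (v :: rest) =
        (if ((rest.takeWhile (fun x => x == v)).length == 0)
            && (prev != some (v - 1))
            && (match r.head? with | none => true | some w => w != v + 1)
          then [v] else []) ++ checkAltLoop (some v) r := by
      rw [checkAltLoop]
    clear_value r
    -- basic facts
    have ht : ∀ x ∈ rest.takeWhile (fun x => x == v), x = v := by
      intro x hx; simpa using List.mem_takeWhile_imp hx
    have hrest : rest.takeWhile (fun x => x == v) ++ r = rest := by
      rw [hrdef]; exact List.takeWhile_append_dropWhile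
    have hvle : ∀ x ∈ rest, v ≤ x := (List.pairwise_cons.mp hs).1
    have hrp : r.Pairwise (· ≤ ·) := by
      rw [hrdef]; exact (hs.of_cons).sublist (List.dropWhile_sublist _)
    have hvlt : ∀ x ∈ r, v < x := by
      rcases hre : r with _ | ⟨w, r''⟩
      · intro x hx; simp at hx
      · have hdc : rest.dropWhile (fun x => x == v) = w :: r'' := by rw [← hrdef]; exact hre
        have hne : rest.dropWhile (fun x => x == v) ≠ [] := by simp [hdc]
        have h2 := List.head_dropWhile_not (fun x => x == v) hne
        have h3 : (rest.dropWhile (fun x => x == v)).head hne = w := by simp [hdc]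
        rw [h3] at h2
        have hwv : w ≠ v := by simpa using h2
        have hwmem : w ∈ rest := by
          have : w ∈ r := by rw [hre]; simp
          rw [hrdef] at this; exact (List.dropWhile_sublist _).mem this
        have hvw : v < w := lt_of_le_of_ne (hvle w hwmem) (fun h => hwv h.symm)
        intro x hx
        rcases List.mem_cons.mp hx with h | h
        · exact h ▸ hvw
        · have hle : w ≤ x := (List.pairwise_cons.mp (hre ▸ hrp)).1 x h
          exact lt_of_lt_of_le hvw hle
    have hvnr : v ∉ r := fun h => lt_irrefl v (hvlt v h)
    have hmem : ∀ x, x ∈ (v :: rest) ↔ x = v ∨ x ∈ r := by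
      intro x
      constructor
      · intro hx
        rcases List.mem_cons.mp hx with h | h
        · exact Or.inl h
        · rw [← hrest] at h
          rcases List.mem_append.mp h with h | h
          · exact Or.inl (ht x h)
          · exact Or.inr h
      · intro hx
        rcases hx with h | h
        · simp [h]
        · have : x ∈ rest := by rw [← hrest]; exact List.mem_append.mpr (Or.inr h)
          simp [this]
    have hcr : rest.count v = (rest.takeWhile (fun x => x == v)).length := by
      conv_lhs => rw [← hrest]
      rw [List.count_append]
      have h1 : (rest.takeWhile (fun x => x == v)).count v
          = (rest.takeWhile (fun x => x == v)).length :=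
        List.count_eq_length.mpr (fun b hb => (ht b hb).symm)
      have h2 : r.count v = 0 := List.count_eq_zero.mpr hvnr
      omega
    have hcountv : (v :: rest).count v = 1 + (rest.takeWhile (fun x => x == v)).length := by
      rw [List.count_cons_self, hcr]; omega
    have hcountk : ∀ k, k ≠ v → (v :: rest).count k = r.count k := by
      intro k hk
      have hck : rest.count k = r.count k := by
        conv_lhs => rw [← hrest]
        rw [List.count_append]
        have h1 : (rest.takeWhile (fun x => x == v)).count k = 0 :=
          List.count_eq_zero.mpr (fun h => hk (ht k h))
        omega
      rw [List.count_cons, hck]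
      have h2 : ¬(v == k) = true := by simpa using Ne.symm hk
      rw [if_neg h2]
      omega
    -- assemble
    rw [hunf]
    rw [ih hrp (fun p hpv x hx => by cases hpv; exact hvlt x hx)]
    have hofl : PySem.Set.ofList (v :: rest) = v :: PySem.Set.ofList r := by
      rw [← hrest, ← List.cons_append]
      exact ofList_run _ _ _ ht hvnr
    have hsplit : ∀ (c : Bool) (a : Int) (L : List Int),
        (if c = true then a :: L else L) = (if c = true then [a] else []) ++ L := by
      intro c a L; cases c <;> simp
    rw [hofl, List.filter_cons]
    conv_rhs => rw [hsplit]
    -- head condition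
    have hhead : (((rest.takeWhile (fun x => x == v)).length == 0)
        && (prev != some (v - 1))
        && (match r.head? with | none => true | some w => w != v + 1))
        = condB prev (v :: rest) v := by
      have hmemp1 : (v + 1) ∈ (v :: rest) ↔ (v + 1) ∈ r := by
        rw [hmem]
        constructor
        · rintro (h | h)
          · omega
          · exact h
        · exact Or.inr
      have hmemm1 : (v - 1) ∉ (v :: rest) := by
        rw [hmem]
        rintro (h | h)
        · omega
        · exact absurd (hvlt _ h) (by omega)
      have hheadmem : (match r.head? with | none => true | some w => w != v + 1)
          = !decide ((v + 1) ∈ r) := by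
        rcases hre : r with _ | ⟨w, r''⟩
        · simp
        · simp only [List.head?_cons]
          by_cases hw : w = v + 1
          · simp [hw]
          · have : (v + 1) ∉ w :: r'' := by
              intro hmem'
              rcases List.mem_cons.mp hmem' with h | h
              · exact hw h.symm
              · have hwle : w ≤ v + 1 := by
                  rw [hre] at hrp
                  exact (List.pairwise_cons.mp hrp).1 _ h
                have : v < w := hvlt w (by rw [hre]; simp)
                omega
            simp [hw, this]
      rw [Bool.eq_iff_iff]
      simp only [condB, hcountv, hheadmem, Bool.and_eq_true, beq_iff_eq, bne_iff_ne, ne_eq,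
        Bool.not_eq_eq_eq_not, Bool.not_true, List.contains_eq_mem, decide_eq_false_iff_not,
        Bool.not_eq_true', Nat.cast_add, Nat.cast_one]
      constructor
      · rintro ⟨⟨h1, h2⟩, h3⟩
        refine ⟨⟨⟨by omega, by rw [hmemp1]; exact h3⟩, h2⟩, hmemm1⟩
      · rintro ⟨⟨⟨h1, h2⟩, h3⟩, h4⟩
        exact ⟨⟨by omega, h3⟩, by rwa [hmemp1] at h2⟩
    rw [hhead]
    -- tail congruence
    congr 1
    apply List.filter_congr
    intro k hk
    have hkr : k ∈ r := (PySem.Set.mem_ofList r k).mp hk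
    have hvk : v < k := hvlt k hkr
    have hck : (v :: rest).count k = r.count k := hcountk k (by omega)
    have hmp1 : (k + 1) ∈ (v :: rest) ↔ (k + 1) ∈ r := by
      rw [hmem]
      constructor
      · rintro (h | h)
        · omega
        · exact h
      · exact Or.inr
    have hmm1 : (k - 1) ∈ (v :: rest) ↔ (k - 1 = v ∨ (k - 1) ∈ r) := hmem _
    have hprev : (prev != some (k - 1)) = true := by
      rcases hpe : prev with _ | p
      · simp
      · have : p < v := hp p hpe v (by simp)
        simp only [bne_iff_ne, ne_eq, Option.some.injEq]
        omega
    rw [Bool.eq_iff_iff]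
    simp only [condB, hck, hprev, Bool.and_eq_true, beq_iff_eq, bne_iff_ne, ne_eq,
      List.contains_eq_mem, Bool.not_eq_eq_eq_not, Bool.not_true, decide_eq_false_iff_not,
      Bool.not_eq_true', Option.some.injEq, true_and, and_true]
    constructor
    · rintro ⟨⟨⟨h1, h2⟩, h3⟩, h4⟩
      refine ⟨⟨h1, by rw [hmp1]; exact h2⟩, ?_⟩
      rw [hmm1]
      rintro (h | h)
      · exact h3 h.symm
      · exact h4 h
    · rintro ⟨⟨h1, h2⟩, h3⟩
      rw [hmm1] at h3
      push_neg at h3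
      exact ⟨⟨⟨h1, by rwa [hmp1] at h2⟩, fun h => h3.1 h.symm⟩, h3.2⟩

lemma check_eq_filter (n : Int) (nums : List Int) :
    check n nums =
      (PySem.Set.ofList (PySem.List.sorted nums (fun x => x) false)).filter
        (condB none (PySem.List.sorted nums (fun x => x) false)) := by
  unfold check
  simp only []
  generalize PySem.List.sorted nums (fun x => x) false = s
  have hd : s.foldl
      (fun d i => if d.contains i then d.insert i (d.getD i 0 + 1) else d.insert i 1)
      (PySem.Dict.empty : PySem.Dict Int Int) = PySem.Dict.counter s := by
    rw [PySem.List.foldl_congr_mem s _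
      (fun d i => d.insert i (d.getD i 0 + 1)) PySem.Dict.empty ?_]
    · exact PySem.Dict.foldl_insert_getD_add_one_eq_counter s
    · intro d i _
      by_cases h : d.contains i
      · simp [h]
      · simp only [h, Bool.false_eq_true, if_false]
        rw [PySem.Dict.getD_of_not_contains (h := by simpa using h)]
        norm_num
  simp only [hd]
  generalize hddef : PySem.Dict.counter s = d
  have hcollapse : d.items.foldl
      (fun acc kv =>
        if kv.2 == 1 then
          if !(d.contains (kv.1 + 1)) then
            if !(d.contains (kv.1 - 1)) then acc ++ [kv.1] else acc
          else acc
        else acc) [] =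
      d.items.foldl
      (fun acc kv => if ((kv.2 == 1) && !(d.contains (kv.1 + 1)) && !(d.contains (kv.1 - 1))) then acc ++ [kv.1] else acc) [] := by
    apply PySem.List.foldl_congr_mem
    intro acc kv _
    by_cases h1 : kv.2 == 1 <;> by_cases h2 : d.contains (kv.1 + 1) <;>
      by_cases h3 : d.contains (kv.1 - 1) <;> simp [h1, h2, h3]
  rw [hcollapse, PySem.List.foldl_append_if _ (fun kv => kv.1) d.items []]
  rw [← hddef, PySem.Dict.items_counter s]
  rw [List.filter_map]
  rw [List.map_map]
  simp only [Function.comp_def]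
  rw [List.map_id']
  apply List.filter_congr
  intro k hk
  simp only [condB, PySem.Dict.contains_counter, List.contains_eq_mem]
  cases (↑(List.count k s) == (1:Int)) <;> cases decide (k + 1 ∈ s) <;> cases decide (k - 1 ∈ s) <;> rfl

-- ===== VERDICT (by name: the statement is the Claim_ definition above) =====
theorem check_spec : Claim_equal_check := by
  intro n nums _
  unfold Spec_check check_alt
  rw [check_eq_filter, altLoop_eq]
  · exact PySem.List.sorted_pairwise nums (fun x => x)
  · intro p hp; cases hp
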